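-- pv_equiv track=rewrite | github.com/markbotros501/Apostolic-Orthodox-Writings | tools/patristic_latin_pdf.py | is_probably_latin
-- ===== SOURCE A (Python) =====
-- def is_probably_latin(text: str) -> bool:
--     t = f" {text.lower()} "
--     hits = sum(
--         1
--         for w in (
--             " et ",
--             " est ",
--             " non ",
--             " sed ",
--             " quod ",
--             " autem ",
--             " cum ",
--             " sunt ",
--             " enim ",
--             " ergo ",
--             " qui ",
--             " hoc ",
--             " ipsum ",
--         )
--         if w in t
--     )
--     return hits >= 2
-- ===== SOURCE B (Python) =====
-- LATIN_STOPWORDS = frozenset((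
--     "et", "est", "non", "sed", "quod", "autem", "cum",
--     "sunt", "enim", "ergo", "qui", "hoc", "ipsum",
-- ))
--
--
-- def is_probably_latin(text: str) -> bool:
--     # Single left-to-right tokenizing pass (split on the literal space, like
--     # the padded-substring tests do) collecting the distinct stopwords seen.
--     found = set()
--     word = []
--     for c in text.lower() + " ":
--         if c == " ":
--             w = "".join(word)
--             if w in LATIN_STOPWORDS:
--                 found.add(w)
--             word = []
--         else:
--             word.append(c)
--     return len(found) >= 2
-- ===== Notes on version B (the rewrite author's own statement) =====
-- stated objective: alternative
-- what changed: Replaces the 13 padded-substring scans of the whole text with a single left-to-right tokenizing pass (splitting on the literal space) that collects the distinct stopwords seen in a set.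
import Mathlib
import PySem

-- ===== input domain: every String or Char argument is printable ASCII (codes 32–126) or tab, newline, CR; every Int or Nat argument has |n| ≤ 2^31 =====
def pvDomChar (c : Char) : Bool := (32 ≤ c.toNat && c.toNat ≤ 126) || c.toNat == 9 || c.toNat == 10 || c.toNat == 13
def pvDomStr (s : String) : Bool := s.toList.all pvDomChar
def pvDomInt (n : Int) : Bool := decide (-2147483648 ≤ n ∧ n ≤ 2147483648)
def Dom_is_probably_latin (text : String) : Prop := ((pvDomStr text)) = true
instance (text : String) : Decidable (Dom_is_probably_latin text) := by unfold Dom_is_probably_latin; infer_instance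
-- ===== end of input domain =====

-- B replaces A's 13 padded-substring scans of the whole text by one left-to-right
-- tokenizing pass (splitting on the literal space) collecting the distinct stopwords
-- seen; same result, alternative algorithm (not claimed faster).

-- ===== PORT A =====
def is_probably_latin (text : String) : Bool :=
  let t := " " ++ PySem.Str.lower text ++ " "
  let hits : Int :=
    [" et ", " est ", " non ", " sed ", " quod ", " autem ", " cum ",
     " sunt ", " enim ", " ergo ", " qui ", " hoc ", " ipsum "].foldl
      (fun acc w => if PySem.Str.isIn w t then acc + 1 else acc) 0
  decide (2 ≤ hits)

-- ===== PORT B =====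
-- the frozenset of stopwords, over code points (strings are handled as List Char here)
def latinStopwords : List (List Char) :=
  [['e','t'], ['e','s','t'], ['n','o','n'], ['s','e','d'], ['q','u','o','d'],
   ['a','u','t','e','m'], ['c','u','m'], ['s','u','n','t'], ['e','n','i','m'],
   ['e','r','g','o'], ['q','u','i'], ['h','o','c'], ['i','p','s','u','m']]

-- the 'for c in text.lower() + " "' loop of Source B: splits at each space, adds the
-- finished word to 'found' when it is a stopword
def latinScan : List Char → PySem.Set (List Char) → List Char → PySem.Set (List Char)
  | [], found, _ => found
  | c :: rest, found, word =>
    if c = ' ' then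
      latinScan rest (if latinStopwords.contains word then found.add word else found) []
    else
      latinScan rest found (word ++ [c])

def is_probably_latin_alt (text : String) : Bool :=
  let found := latinScan ((PySem.Str.lower text).toList ++ [' ']) PySem.Set.empty []
  decide (2 ≤ (found.length : Int))

-- ===== PRECONDITION & SPEC =====
def Spec_is_probably_latin (text : String) (out : Bool) : Prop := out = is_probably_latin_alt text
instance (text : String) (out : Bool) : Decidable (Spec_is_probably_latin text out) := by unfold Spec_is_probably_latin; infer_instance

-- ===== CLAIM (what is proved, stated in full; the proofs are below) =====
def Claim_equal_is_probably_latin : Prop := ∀ (text : String), Dom_is_probably_latin text → Spec_is_probably_latin text (is_probably_latin text)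

-- ===== LEMMAS AND PROOFS =====

-- the completed words of the scan: pieces of the character list cut at each space
-- (the trailing partial word is discarded, as the loop does)
def complWords : List Char → List Char → List (List Char)
  | _, [] => []
  | word, c :: rest =>
    if c = ' ' then word :: complWords [] rest else complWords (word ++ [c]) rest

theorem latinScan_eq_foldl (cs : List Char) :
    ∀ (found : PySem.Set (List Char)) (word : List Char),
      latinScan cs found word =
        (complWords word cs).foldl
          (fun s w => if latinStopwords.contains w then s.add w else s) found := by
  induction cs with
  | nil => intro found word; simp [latinScan, complWords]
  | cons c rest ih =>
    intro found word
    by_cases hc : c = ' ' <;> simp [latinScan, complWords, hc, ih]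

theorem foldl_addIf_eq_filter (P : List Char → Bool) (l : List (List Char)) :
    ∀ (s : PySem.Set (List Char)),
      l.foldl (fun s w => if P w then s.add w else s) s =
        (l.filter P).foldl PySem.Set.add s := by
  induction l with
  | nil => intro s; simp
  | cons c rest ih =>
    intro s
    by_cases h : P c <;> simp [h, ih]

-- splitting a space-free word followed by a space off the front of the scan
theorem complWords_word_space (w : List Char) (hw : ' ' ∉ w) :
    ∀ (word t : List Char),
      complWords word (w ++ ' ' :: t) = (word ++ w) :: complWords [] t := by
  induction w with
  | nil => intro word t; simp [complWords]
  | cons c w' ih =>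
    intro word t
    have hc : c ≠ ' ' := fun h => hw (h ▸ List.mem_cons_self)
    have hw' : ' ' ∉ w' := fun h => hw (List.mem_cons_of_mem _ h)
    simp [complWords, hc, ih hw', List.append_assoc]

theorem mem_compl_infix (w : List Char) (cs : List Char) :
    ∀ (word : List Char), w ∈ complWords word (cs ++ [' ']) →
      (' ' :: (w ++ [' '])) <:+: (' ' :: (word ++ cs ++ [' '])) := by
  induction cs with
  | nil =>
    intro word h
    simp [complWords] at h
    subst h
    simp
  | cons c rest ih =>
    intro word h
    by_cases hc : c = ' '
    · subst hc
      simp [complWords] at h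
      rcases h with h | h
      · subst h
        exact List.IsPrefix.isInfix ⟨rest ++ [' '], by simp⟩
      · have hmem := ih [] h
        simp only [List.nil_append] at hmem
        exact hmem.trans (List.IsSuffix.isInfix ⟨' ' :: word, by simp⟩)
    · simp only [List.cons_append, complWords, if_neg hc] at h
      have hmem := ih (word ++ [c]) h
      simpa [List.append_assoc] using hmem

theorem infix_mem_compl (w : List Char) (hw : ' ' ∉ w) (cs : List Char) :
    ∀ (word : List Char), (' ' :: (w ++ [' '])) <:+: (cs ++ [' ']) →
      w ∈ complWords word (cs ++ [' ']) := by
  induction cs with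
  | nil =>
    intro word h
    have := h.length_le
    simp at this
  | cons c rest ih =>
    intro word h
    rw [List.cons_append, List.infix_cons_iff] at h
    rcases h with h | h
    · rw [List.cons_prefix_cons] at h
      obtain ⟨hc, hpre⟩ := h
      subst hc
      obtain ⟨t, ht⟩ := hpre
      have ht' : rest ++ [' '] = w ++ ' ' :: t := by
        rw [← ht]; simp
      simp only [List.cons_append, complWords]
      rw [if_pos trivial, ht', complWords_word_space w hw [] t]
      simp
    · by_cases hc : c = ' '
      · subst hc
        simp only [List.cons_append, complWords]
        rw [if_pos trivial]
        exact List.mem_cons_of_mem _ (ih [] h)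
      · simp only [List.cons_append, complWords]
        rw [if_neg hc]
        exact ih (word ++ [c]) h

theorem tok_iff (w : List Char) (hw : ' ' ∉ w) (cs : List Char) :
    PySem.Chars.isIn (' ' :: (w ++ [' '])) (' ' :: (cs ++ [' '])) =
      decide (w ∈ complWords [] (cs ++ [' '])) := by
  cases hb : PySem.Chars.isIn (' ' :: (w ++ [' '])) (' ' :: (cs ++ [' '])) with
  | false =>
    rw [PySem.Chars.isIn_eq_false_iff] at hb
    symm
    simp only [decide_eq_false_iff_not]
    intro hmem
    exact hb (by simpa using mem_compl_infix w cs [] hmem)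
  | true =>
    rw [PySem.Chars.isIn_iff_infix, List.infix_cons_iff] at hb
    symm
    simp only [decide_eq_true_eq]
    rcases hb with h | h
    · rw [List.cons_prefix_cons] at h
      obtain ⟨t, ht⟩ := h.2
      have ht' : cs ++ [' '] = w ++ ' ' :: t := by
        rw [← ht]; simp
      rw [ht', complWords_word_space w hw [] t]
      simp
    · exact infix_mem_compl w hw cs [] h

theorem count_sets_eq (pieces : List (List Char)) :
    ((pieces.filter (fun p => latinStopwords.contains p)).foldl PySem.Set.add
        PySem.Set.empty).length =
      latinStopwords.countP (fun w => decide (w ∈ pieces)) := by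
  have hofl : (pieces.filter (fun p => latinStopwords.contains p)).foldl PySem.Set.add
      PySem.Set.empty = PySem.Set.ofList (pieces.filter (fun p => latinStopwords.contains p)) := by
    rw [PySem.Set.ofList_eq_foldl]; rfl
  rw [hofl, List.countP_eq_length_filter]
  have hnodup : (latinStopwords.filter (fun w => decide (w ∈ pieces))).Nodup := by
    apply List.Nodup.filter
    decide
  have hperm : (PySem.Set.ofList (pieces.filter (fun p => latinStopwords.contains p))).Perm
      (latinStopwords.filter (fun w => decide (w ∈ pieces))) := by
    rw [List.perm_ext_iff_of_nodup (PySem.Set.nodup_ofList _) hnodup]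
    intro a
    rw [PySem.Set.mem_ofList]
    simp [List.mem_filter, and_comm]
  exact hperm.length_eq

-- the padded-literal list A scans is the stopword list with a space on each side
theorem stopA_eq_map :
    [" et ", " est ", " non ", " sed ", " quod ", " autem ", " cum ",
     " sunt ", " enim ", " ergo ", " qui ", " hoc ", " ipsum "] =
      latinStopwords.map (fun w => String.ofList (' ' :: (w ++ [' ']))) := rfl

-- ===== VERDICT (by name: the statement is the Claim_ definition above) =====
theorem is_probably_latin_spec : Claim_equal_is_probably_latin := by
  intro text _
  unfold Spec_is_probably_latin is_probably_latin is_probably_latin_alt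
  simp only [stopA_eq_map, PySem.List.foldl_if_add_one, latinScan_eq_foldl,
    foldl_addIf_eq_filter, List.countP_map]
  rw [count_sets_eq]
  have hcong :
      List.countP
          ((fun s => PySem.Str.isIn s (" " ++ PySem.Str.lower text ++ " ")) ∘
            fun w => String.ofList (' ' :: (w ++ [' ']))) latinStopwords =
        List.countP (fun w => decide (w ∈ complWords [] ((PySem.Str.lower text).toList ++ [' '])))
          latinStopwords := by
    apply List.countP_congr
    intro w hwmem
    have hw : ' ' ∉ w := by
      have : latinStopwords.all (fun w => decide (' ' ∉ w)) = true := by decide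
      have := List.all_eq_true.mp this w hwmem
      simpa using this
    have htl : (" " ++ PySem.Str.lower text ++ " ").toList =
        ' ' :: ((PySem.Str.lower text).toList ++ [' ']) := by
      rw [String.toList_append, String.toList_append]
      rfl
    simp only [Function.comp_apply, PySem.Str.isIn_eq, String.toList_ofList, htl,
      tok_iff w hw]
  rw [hcong]
  simp
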